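-- pv_equiv track=rewrite | github.com/cooijmanstim/my3yearold | holster.py | subalternative
-- ===== SOURCE A (Python) =====
-- def subalternative(key, alt):
--   """Leftover of constraint `alt` after selecting `key`.
--
--   Mainly used in Narrow, where a key may select a subtree of the non-narrowed Holster and needs
--   further narrowing. For example, if `h = H(a=H(b=3, c=5))` then `h.Narrow("a.b").a` should select
--   the narrowed subtree `HolsterSubtree(h, "a").Narrow("b")`. In this case, `subalternative("a",
--   "a.b") == "b"`, as `b` is the yet unenforced part of the narrowing constraint `a.b` after
--   selecting `a`.
--
--   Also used by `insubtree`, which requires that there is no leftover, i.e. `key` is fully underneath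
--   `alt`.
--
--   Returns:
--     If `key` is a prefix of `alt`, returns `alt` with the prefix `key` removed. If `alt` is a prefix
--     of `key`, returns the empty string (meaning no constraints left to enforce).
--   Raises:
--     KeyError if `key` and `alt` do not share a prefix (i.e. `key` violates `alt`).
--   """
--   assert " " not in key
--   assert " " not in alt
--   keyparts, altparts = key.split("."), alt.split(".")
--   while keyparts and altparts:
--     a, b = keyparts.pop(0), altparts.pop(0)
--     if a != b:
--       raise KeyError()
--   return ".".join(altparts)
-- ===== SOURCE B (Python) =====
-- def subalternative(key, alt):
--   assert " " not in key
--   assert " " not in alt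
--   if key == alt:
--     return ""
--   if alt.startswith(key + "."):
--     return alt[len(key) + 1:]
--   if key.startswith(alt + "."):
--     return ""
--   raise KeyError()
-- ===== Notes on version B (the rewrite author's own statement) =====
-- stated objective: idiomatic
-- what changed: Replaces the split-into-parts/pop loop by direct whole-string comparisons: key == alt, alt.startswith(key + '.') with a slice, key.startswith(alt + '.').
import Mathlib
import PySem

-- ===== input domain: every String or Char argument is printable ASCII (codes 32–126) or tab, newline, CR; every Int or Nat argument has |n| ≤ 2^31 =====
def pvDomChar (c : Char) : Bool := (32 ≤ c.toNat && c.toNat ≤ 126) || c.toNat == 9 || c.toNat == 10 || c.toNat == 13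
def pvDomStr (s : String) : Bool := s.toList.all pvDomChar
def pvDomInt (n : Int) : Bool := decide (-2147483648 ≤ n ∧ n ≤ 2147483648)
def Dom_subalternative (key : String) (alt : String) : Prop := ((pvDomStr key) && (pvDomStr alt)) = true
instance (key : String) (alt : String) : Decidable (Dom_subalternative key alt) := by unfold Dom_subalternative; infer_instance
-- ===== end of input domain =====

-- B replaces A's split-into-parts/pop loop by direct whole-string prefix comparisons (idiomatic, same cost).
-- Equivalence is about the return value on Pre_ (where Python A returns; A's asserts and KeyError are excluded by Pre_).

-- ===== PORT A =====
-- the while-loop of A: pop the first part of each while both lists are nonempty; on mismatch KeyError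
-- (outside Pre_, port returns ""); at the end ".".join(altparts)
def subalternativeLoop : List (List Char) → List (List Char) → String
  | a :: kp, b :: ap => if a = b then subalternativeLoop kp ap else ""
  | _, ap => String.ofList (PySem.Chars.join ['.'] ap)

def subalternative (key : String) (alt : String) : String :=
  if PySem.Str.isIn " " key then ""  -- assert fails (outside Pre_)
  else if PySem.Str.isIn " " alt then ""  -- assert fails (outside Pre_)
  else subalternativeLoop (PySem.Chars.splitOn key.toList ['.']) (PySem.Chars.splitOn alt.toList ['.'])

-- ===== PORT B =====
def subalternative_alt (key : String) (alt : String) : String :=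
  if PySem.Str.isIn " " key then ""  -- assert fails (outside Pre_)
  else if PySem.Str.isIn " " alt then ""  -- assert fails (outside Pre_)
  else if key == alt then ""
  else if PySem.Str.startswith alt (key ++ ".") then PySem.Str.slice alt (some ((PySem.Str.len key : Int) + 1)) none
  else if PySem.Str.startswith key (alt ++ ".") then ""
  else ""  -- KeyError (outside Pre_)

-- ===== PRECONDITION & SPEC =====
-- Pre_ excludes exactly the inputs where A raises: a space in either argument (AssertionError) and
-- arguments whose dotted parts do not share a prefix (KeyError).
def Pre_subalternative (key : String) (alt : String) : Prop :=
  PySem.Str.isIn " " key = false ∧ PySem.Str.isIn " " alt = false ∧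
  (key = alt ∨ (key.toList ++ ['.']) <+: alt.toList ∨ (alt.toList ++ ['.']) <+: key.toList)
instance (key : String) (alt : String) : Decidable (Pre_subalternative key alt) := by
  unfold Pre_subalternative; infer_instance

def pvWitness_subalternative : String × String := ("a", "a.b")

def Spec_subalternative (key : String) (alt : String) (out : String) : Prop := out = subalternative_alt key alt
instance (key : String) (alt : String) (out : String) : Decidable (Spec_subalternative key alt out) := by unfold Spec_subalternative; infer_instance

-- ===== CLAIM (what is proved, stated in full; the proofs are below) =====
def Claim_equal_subalternative : Prop := ∀ (key : String) (alt : String), Dom_subalternative key alt → Pre_subalternative key alt → Spec_subalternative key alt (subalternative key alt)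

-- ===== LEMMAS AND PROOFS =====

-- General splitOnP fact: splitting across an occurrence of the separator splits into two independent splits.
theorem splitOnP_append_cons {α : Type} (p : α → Bool) (x : α) (hx : p x = true) :
    ∀ (a b : List α), List.splitOnP p (a ++ x :: b) = List.splitOnP p a ++ List.splitOnP p b := by
  intro a b
  induction a with
  | nil => simp [List.splitOnP_cons, hx, List.splitOnP_nil]
  | cons c a ih =>
      by_cases hc : p c = true
      · simp [List.splitOnP_cons, hc, ih]
      · simp only [List.cons_append, List.splitOnP_cons, hc, Bool.false_eq_true, if_false, ih]
        cases h : List.splitOnP p a with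
        | nil => exact absurd h (List.splitOnP_ne_nil p a)
        | cons hd tl => simp

-- PySem.Chars.splitOn.go, given enough fuel, computes List.splitOnP on the suffix.
theorem splitOn_go_eq (fuel : Nat) : ∀ (l cur : List Char) (acc : List (List Char)), l.length ≤ fuel →
    PySem.Chars.splitOn.go ['.'] fuel l cur acc
      = acc.reverse ++ List.modifyHead (cur.reverse ++ ·) (List.splitOnP (· == '.') l) := by
  induction fuel with
  | zero =>
      intro l cur acc h
      have : l = [] := List.eq_nil_of_length_eq_zero (Nat.le_zero.mp h)
      subst this
      simp [PySem.Chars.splitOn.go, List.splitOnP_nil]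
  | succ fuel ih =>
      intro l cur acc h
      cases l with
      | nil => simp [PySem.Chars.splitOn.go, List.splitOnP_nil]
      | cons c rest =>
          by_cases hc : c = '.'
          · subst hc
            rw [PySem.Chars.splitOn.go.eq_def]
            simp only [List.isPrefixOf, Bool.and_true, beq_self_eq_true,
              if_true, List.length_cons, List.length_nil, List.drop_succ_cons, List.drop_zero]
            rw [ih rest [] _ (by simpa using h)]
            cases hsp : List.splitOnP (· == '.') rest with
            | nil => exact absurd hsp (List.splitOnP_ne_nil _ rest)
            | cons hd tl => simp [List.splitOnP_cons, hsp]
          · rw [PySem.Chars.splitOn.go.eq_def]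
            have hpre : ['.'].isPrefixOf (c :: rest) = false := by
              simp [List.isPrefixOf]; exact fun h' => absurd h'.symm hc
            simp only [hpre, Bool.false_eq_true, if_false]
            rw [ih rest (c :: cur) acc (by simpa using Nat.le_of_succ_le_succ h)]
            cases hsp : List.splitOnP (· == '.') rest with
            | nil => exact absurd hsp (List.splitOnP_ne_nil _ rest)
            | cons hd tl =>
                simp [List.splitOnP_cons, hsp, hc]

theorem chars_splitOn_eq (s : List Char) :
    PySem.Chars.splitOn s ['.'] = List.splitOnP (· == '.') s := by
  rw [PySem.Chars.splitOn, splitOn_go_eq (s.length + 1) s [] [] (Nat.le_succ _)]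
  cases hsp : List.splitOnP (· == '.') s with
  | nil => exact absurd hsp (List.splitOnP_ne_nil _ s)
  | cons hd tl => simp

theorem intercalate_splitOnP_dot (s : List Char) :
    ['.'].intercalate (List.splitOnP (· == '.') s) = s := by
  have := List.intercalate_splitOn s '.'
  simpa [List.splitOn] using this

theorem loop_self : ∀ l, subalternativeLoop l l = "" := by
  intro l
  induction l with
  | nil => simp [subalternativeLoop, PySem.Chars.join, List.intercalate]
  | cons a l ih => simp [subalternativeLoop, ih]

theorem loop_key_prefix : ∀ l m, subalternativeLoop l (l ++ m) = String.ofList (PySem.Chars.join ['.'] m) := by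
  intro l
  induction l with
  | nil => intro m; cases m <;> simp [subalternativeLoop]
  | cons a l ih => intro m; simp [subalternativeLoop, ih]

theorem loop_alt_prefix : ∀ l m, subalternativeLoop (l ++ m) l = "" := by
  intro l
  induction l with
  | nil => intro m; cases m <;> simp [subalternativeLoop, PySem.Chars.join, List.intercalate]
  | cons a l ih => intro m; simp [subalternativeLoop, ih]

-- ===== VERDICT (by name: the statement is the Claim_ definition above) =====
theorem subalternative_spec : Claim_equal_subalternative := by
  intro key alt _ hpre
  obtain ⟨hk, ha, hcase⟩ := hpre
  unfold Spec_subalternative subalternative subalternative_alt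
  simp only [hk, ha, Bool.false_eq_true, if_false]
  rcases hcase with heq | h2 | h3
  · subst heq
    simp [loop_self]
  · -- key ++ "." is a prefix of alt: A returns the remainder t, B slices it off
    obtain ⟨t, ht⟩ := h2
    have htl : alt.toList = key.toList ++ '.' :: t := by
      simpa using ht.symm
    have hne : (key == alt) = false := by
      apply beq_eq_false_iff_ne.mpr
      intro h
      have := congrArg (fun s => s.toList.length) h
      simp [htl] at this
    have hsw : PySem.Str.startswith alt (key ++ ".") = true := by
      rw [show PySem.Str.startswith alt (key ++ ".") = PySem.Chars.startswith alt.toList (key ++ ".").toList from rfl]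
      rw [PySem.Chars.startswith_iff]
      rw [String.toList_append]
      exact ⟨t, by simpa using ht⟩
    simp only [hne, Bool.false_eq_true, if_false, hsw, if_true]
    rw [chars_splitOn_eq key.toList, chars_splitOn_eq alt.toList, htl,
      splitOnP_append_cons (· == '.') '.' (by simp) key.toList t, loop_key_prefix]
    -- both sides are the string of the char list t
    apply String.toList_injective
    have h1 : (String.ofList (PySem.Chars.join ['.'] (List.splitOnP (· == '.') t))).toList = t := by
      simp [PySem.Chars.join, intercalate_splitOnP_dot]
    rw [h1]
    rw [show (PySem.Str.slice alt (some ((PySem.Str.len key : Int) + 1)) none).toList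
        = PySem.List.slice alt.toList (some ((PySem.Str.len key : Int) + 1)) none from by
      simp [PySem.Str.toList_slice]]
    rw [PySem.List.slice_from _ (by rw [PySem.Str.len_eq]; omega)]
    have hlen1 : ((PySem.Str.len key : Int) + 1).toNat = (key.toList ++ ['.']).length := by
      simp [PySem.Str.len_eq]
    rw [hlen1, htl, show key.toList ++ '.' :: t = (key.toList ++ ['.']) ++ t from by simp,
      List.drop_left]
  · -- alt ++ "." is a prefix of key: A's loop empties altparts first, B's third branch fires
    obtain ⟨t, ht⟩ := h3
    have htl : key.toList = alt.toList ++ '.' :: t := by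
      simpa using ht.symm
    have hne : (key == alt) = false := by
      apply beq_eq_false_iff_ne.mpr
      intro h
      have := congrArg (fun s => s.toList.length) h
      simp [htl] at this
    have hsw1 : PySem.Str.startswith alt (key ++ ".") = false := by
      rw [show PySem.Str.startswith alt (key ++ ".") = PySem.Chars.startswith alt.toList (key ++ ".").toList from rfl]
      apply Bool.eq_false_iff.mpr
      intro h
      have hlen := (PySem.Chars.startswith_iff _ _).mp h |>.length_le
      simp [String.toList_append, htl] at hlen
    have hsw2 : PySem.Str.startswith key (alt ++ ".") = true := by
      rw [show PySem.Str.startswith key (alt ++ ".") = PySem.Chars.startswith key.toList (alt ++ ".").toList from rfl]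
      rw [PySem.Chars.startswith_iff]
      rw [String.toList_append]
      exact ⟨t, by simpa using ht⟩
    simp only [hne, Bool.false_eq_true, if_false, hsw1, hsw2, if_true]
    rw [chars_splitOn_eq key.toList, chars_splitOn_eq alt.toList, htl,
      splitOnP_append_cons (· == '.') '.' (by simp) alt.toList t, loop_alt_prefix]
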